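-- pv_equiv track=rewrite | github.com/ScopeFoundry/ScopeFoundry | sweeping/sweep_3D_modes.py | mk_indices_gen
-- ===== SOURCE A (Python) =====
-- def mk_indices_gen(ar_1, ar_2, ar_3, mode="nested"):
--     if mode == "nested":
--         for k, v in enumerate(ar_1):
--             for l, v in enumerate(ar_2):
--                 for m, v in enumerate(ar_3):
--                     yield k, l, m,
--
--     elif mode == "co-move":
--         for n, v in enumerate(ar_3):
--             yield 0, 0, n
--
--     elif mode == "2,3_co-move":
--         for k, v in enumerate(ar_1):
--             for m, v in enumerate(ar_3):
--                 yield k, 0, m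
--
--     elif mode == "1,2_co-move":
--         for l, v in enumerate(ar_2):
--             for m, v in enumerate(ar_3):
--                 yield 0, l, m
-- ===== SOURCE B (Python) =====
-- def mk_indices_gen(ar_1, ar_2, ar_3, mode="nested"):
--     # Single flat counter over the total number of tuples; each flat index i is
--     # decomposed arithmetically (divmod) into the three coordinates.
--     if mode == "nested":
--         n1, n2, n3 = len(ar_1), len(ar_2), len(ar_3)
--     elif mode == "co-move":
--         n1, n2, n3 = 1, 1, len(ar_3)
--     elif mode == "2,3_co-move":
--         n1, n2, n3 = len(ar_1), 1, len(ar_3)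
--     elif mode == "1,2_co-move":
--         n1, n2, n3 = 1, len(ar_2), len(ar_3)
--     else:
--         return
--     for i in range(n1 * n2 * n3):
--         yield i // (n2 * n3), (i // n3) % n2, i % n3
-- ===== Notes on version B (the rewrite author's own statement) =====
-- stated objective: alternative
-- what changed: Replaces the four hand-written nested enumerate loop nests with a single flat loop over one counter 0..n1*n2*n3-1 whose value is decomposed into the three coordinates by integer division and modulus (mixed-radix divmod), with the effective dimensions (n1,n2,n3) selected per mode.
import Mathlib
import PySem

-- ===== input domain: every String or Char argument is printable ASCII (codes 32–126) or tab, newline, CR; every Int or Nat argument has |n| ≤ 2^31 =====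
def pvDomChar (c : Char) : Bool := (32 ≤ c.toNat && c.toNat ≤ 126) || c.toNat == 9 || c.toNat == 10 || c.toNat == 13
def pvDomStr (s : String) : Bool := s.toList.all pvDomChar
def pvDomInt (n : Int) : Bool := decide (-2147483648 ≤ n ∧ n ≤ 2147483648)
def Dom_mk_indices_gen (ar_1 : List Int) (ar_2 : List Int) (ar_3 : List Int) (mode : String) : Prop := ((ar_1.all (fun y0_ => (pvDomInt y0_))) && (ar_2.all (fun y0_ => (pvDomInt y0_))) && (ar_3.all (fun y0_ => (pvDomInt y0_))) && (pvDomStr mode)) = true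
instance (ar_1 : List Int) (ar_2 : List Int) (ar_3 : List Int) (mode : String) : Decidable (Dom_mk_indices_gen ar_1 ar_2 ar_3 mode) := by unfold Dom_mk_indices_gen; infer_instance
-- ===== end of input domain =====

-- B replaces A's four nested enumerate loop nests with one flat loop over a single
-- counter 0..n1*n2*n3-1, decomposed into coordinates by divmod (mixed-radix);
-- alternative algorithm of the same cost, equivalence proved for all inputs.

-- ===== PORT A =====
-- Literal port of A: four branches of nested `for … in enumerate(…)` loops,
-- each level a flatMap, the innermost yield a map.
def mk_indices_gen (ar_1 : List Int) (ar_2 : List Int) (ar_3 : List Int) (mode : String) : List (Int × Int × Int) :=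
  if mode = "nested" then
    (PySem.List.enumerate ar_1 0).flatMap (fun kv =>
      (PySem.List.enumerate ar_2 0).flatMap (fun lv =>
        (PySem.List.enumerate ar_3 0).map (fun mv => (kv.1, lv.1, mv.1))))
  else if mode = "co-move" then
    (PySem.List.enumerate ar_3 0).map (fun nv => ((0 : Int), (0 : Int), nv.1))
  else if mode = "2,3_co-move" then
    (PySem.List.enumerate ar_1 0).flatMap (fun kv =>
      (PySem.List.enumerate ar_3 0).map (fun mv => (kv.1, (0 : Int), mv.1)))
  else if mode = "1,2_co-move" then
    (PySem.List.enumerate ar_2 0).flatMap (fun lv =>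
      (PySem.List.enumerate ar_3 0).map (fun mv => ((0 : Int), lv.1, mv.1)))
  else []

-- ===== PORT B =====
-- Port of B: the mode selects the effective dimensions (n1, n2, n3) (unknown mode:
-- none = early `return`); then one flat loop over range(n1*n2*n3), each counter
-- value split into the three coordinates by // and %.
-- dims: the mode-selection (unknown mode: none = early `return`)
def pvDims (ar_1 : List Int) (ar_2 : List Int) (ar_3 : List Int) (mode : String) : Option (Int × Int × Int) :=
  if mode = "nested" then some ((ar_1.length : Int), (ar_2.length : Int), (ar_3.length : Int))
  else if mode = "co-move" then some (1, 1, (ar_3.length : Int))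
  else if mode = "2,3_co-move" then some ((ar_1.length : Int), 1, (ar_3.length : Int))
  else if mode = "1,2_co-move" then some (1, (ar_2.length : Int), (ar_3.length : Int))
  else none

def mk_indices_gen_alt (ar_1 : List Int) (ar_2 : List Int) (ar_3 : List Int) (mode : String) : List (Int × Int × Int) :=
  match pvDims ar_1 ar_2 ar_3 mode with
  | none => []
  | some (n1, n2, n3) =>
    (PySem.List.pyRange 0 (n1 * n2 * n3) 1).map (fun i =>
      (PySem.Int.floordiv i (n2 * n3),
       PySem.Int.mod (PySem.Int.floordiv i n3) n2,
       PySem.Int.mod i n3))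

-- ===== PRECONDITION & SPEC =====
def Spec_mk_indices_gen (ar_1 : List Int) (ar_2 : List Int) (ar_3 : List Int) (mode : String) (out : List (Int × Int × Int)) : Prop := out = mk_indices_gen_alt ar_1 ar_2 ar_3 mode
instance (ar_1 : List Int) (ar_2 : List Int) (ar_3 : List Int) (mode : String) (out : List (Int × Int × Int)) : Decidable (Spec_mk_indices_gen ar_1 ar_2 ar_3 mode out) := by unfold Spec_mk_indices_gen; infer_instance

-- ===== CLAIM =====
def Claim_equal_mk_indices_gen : Prop := ∀ (ar_1 : List Int) (ar_2 : List Int) (ar_3 : List Int) (mode : String), Dom_mk_indices_gen ar_1 ar_2 ar_3 mode → Spec_mk_indices_gen ar_1 ar_2 ar_3 mode (mk_indices_gen ar_1 ar_2 ar_3 mode)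

-- ===== LEMMAS AND PROOFS =====

-- flatMap over enumerate that only uses the index = flatMap over the index range
theorem enum_flatMap_fst {α : Type} (xs : List Int) (s : Int) (f : Int → List α) :
    (PySem.List.enumerate xs s).flatMap (fun p => f p.1)
      = (PySem.List.pyRange s (s + xs.length) 1).flatMap f := by
  induction xs generalizing s with
  | nil => simp [PySem.List.enumerate_nil, PySem.List.pyRange_one_eq_nil]
  | cons x xs ih =>
    rw [PySem.List.enumerate_cons, PySem.List.pyRange_one_cons (by simp)]
    have hl : s + ((x :: xs).length : Int) = (s + 1) + (xs.length : Int) := by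
      simp only [List.length_cons]; push_cast; ring
    rw [hl]
    simp [List.flatMap_cons, ih]

-- map over enumerate that only uses the index = map over the index range
theorem enum_map_fst {α : Type} (xs : List Int) (s : Int) (f : Int → α) :
    (PySem.List.enumerate xs s).map (fun p => f p.1)
      = (PySem.List.pyRange s (s + xs.length) 1).map f := by
  induction xs generalizing s with
  | nil => simp [PySem.List.enumerate_nil, PySem.List.pyRange_one_eq_nil]
  | cons x xs ih =>
    rw [PySem.List.enumerate_cons, PySem.List.pyRange_one_cons (by simp)]
    have hl : s + ((x :: xs).length : Int) = (s + 1) + (xs.length : Int) := by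
      simp only [List.length_cons]; push_cast; ring
    rw [hl]
    simp [ih]


-- A's four loop nests rewritten as nested index ranges
theorem A_nested (ar_1 ar_2 ar_3 : List Int) :
    (PySem.List.enumerate ar_1 0).flatMap (fun kv =>
      (PySem.List.enumerate ar_2 0).flatMap (fun lv =>
        (PySem.List.enumerate ar_3 0).map (fun mv => (kv.1, lv.1, mv.1))))
    = (PySem.List.pyRange 0 (ar_1.length : Int) 1).flatMap (fun k =>
        (PySem.List.pyRange 0 (ar_2.length : Int) 1).flatMap (fun l =>
          (PySem.List.pyRange 0 (ar_3.length : Int) 1).map (fun m => (k, l, m)))) := by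
  calc _ = (PySem.List.pyRange 0 (0 + (ar_1.length : Int)) 1).flatMap (fun k =>
        (PySem.List.enumerate ar_2 0).flatMap (fun lv =>
          (PySem.List.enumerate ar_3 0).map (fun mv => (k, lv.1, mv.1)))) :=
      enum_flatMap_fst ar_1 0 _
    _ = _ := by
      rw [zero_add]
      refine congrArg (fun f => List.flatMap f _) (funext fun k => ?_)
      calc _ = (PySem.List.pyRange 0 (0 + (ar_2.length : Int)) 1).flatMap (fun l =>
            (PySem.List.enumerate ar_3 0).map (fun mv => (k, l, mv.1))) :=
          enum_flatMap_fst ar_2 0 _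
        _ = _ := by
          rw [zero_add]
          refine congrArg (fun f => List.flatMap f _) (funext fun l => ?_)
          have := enum_map_fst ar_3 0 (fun m => (k, l, m))
          rw [zero_add] at this
          exact this

theorem A_co (ar_3 : List Int) :
    (PySem.List.enumerate ar_3 0).map (fun nv => ((0 : Int), (0 : Int), nv.1))
    = (PySem.List.pyRange 0 (ar_3.length : Int) 1).map (fun n => ((0 : Int), (0 : Int), n)) := by
  have := enum_map_fst ar_3 0 (fun n => ((0 : Int), (0 : Int), n))
  rw [zero_add] at this
  exact this

theorem A_23 (ar_1 ar_3 : List Int) :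
    (PySem.List.enumerate ar_1 0).flatMap (fun kv =>
      (PySem.List.enumerate ar_3 0).map (fun mv => (kv.1, (0 : Int), mv.1)))
    = (PySem.List.pyRange 0 (ar_1.length : Int) 1).flatMap (fun k =>
        (PySem.List.pyRange 0 (ar_3.length : Int) 1).map (fun m => (k, (0 : Int), m))) := by
  calc _ = (PySem.List.pyRange 0 (0 + (ar_1.length : Int)) 1).flatMap (fun k =>
        (PySem.List.enumerate ar_3 0).map (fun mv => (k, (0 : Int), mv.1))) :=
      enum_flatMap_fst ar_1 0 _
    _ = _ := by
      rw [zero_add]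
      refine congrArg (fun f => List.flatMap f _) (funext fun k => ?_)
      have := enum_map_fst ar_3 0 (fun m => (k, (0 : Int), m))
      rw [zero_add] at this
      exact this

theorem A_12 (ar_2 ar_3 : List Int) :
    (PySem.List.enumerate ar_2 0).flatMap (fun lv =>
      (PySem.List.enumerate ar_3 0).map (fun mv => ((0 : Int), lv.1, mv.1)))
    = (PySem.List.pyRange 0 (ar_2.length : Int) 1).flatMap (fun l =>
        (PySem.List.pyRange 0 (ar_3.length : Int) 1).map (fun m => ((0 : Int), l, m))) := by
  calc _ = (PySem.List.pyRange 0 (0 + (ar_2.length : Int)) 1).flatMap (fun l =>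
        (PySem.List.enumerate ar_3 0).map (fun mv => ((0 : Int), l, mv.1))) :=
      enum_flatMap_fst ar_2 0 _
    _ = _ := by
      rw [zero_add]
      refine congrArg (fun f => List.flatMap f _) (funext fun l => ?_)
      have := enum_map_fst ar_3 0 (fun m => ((0 : Int), l, m))
      rw [zero_add] at this
      exact this

-- divmod decomposition of one flat range into two nested ranges
theorem divmod2 {α : Type} (a b : Nat) (f : Int → Int → α) :
    (PySem.List.pyRange 0 ((a : Int) * (b : Int)) 1).map
        (fun i => f (PySem.Int.floordiv i (b : Int)) (PySem.Int.mod i (b : Int)))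
      = (PySem.List.pyRange 0 (a : Int) 1).flatMap (fun k =>
          (PySem.List.pyRange 0 (b : Int) 1).map (fun m => f k m)) := by
  rcases Nat.eq_zero_or_pos b with hb | hb
  · subst hb; simp [PySem.List.pyRange_one_eq_nil]
  · have hbz : (0 : Int) < (b : Int) := by exact_mod_cast hb
    induction a with
    | zero => simp [PySem.List.pyRange_one_eq_nil]
    | succ a ih =>
      have hsplit : PySem.List.pyRange 0 (((a + 1 : Nat) : Int) * (b : Int)) 1
          = PySem.List.pyRange 0 ((a : Int) * (b : Int)) 1
            ++ PySem.List.pyRange ((a : Int) * (b : Int)) (((a + 1 : Nat) : Int) * (b : Int)) 1 := by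
        apply PySem.List.pyRange_one_append
        · positivity
        · push_cast; nlinarith
      have hsucc : PySem.List.pyRange 0 (((a + 1 : Nat) : Int)) 1
          = PySem.List.pyRange 0 ((a : Int)) 1 ++ [(a : Int)] := by
        have h1 : ((a + 1 : Nat) : Int) = (a : Int) + 1 := by push_cast; ring
        rw [h1]
        exact PySem.List.pyRange_one_succ_right (by positivity)
      rw [hsplit, hsucc, List.map_append, List.flatMap_append, ih]
      congr 1
      have htail : PySem.List.pyRange ((a : Int) * (b : Int)) (((a + 1 : Nat) : Int) * (b : Int)) 1
          = (PySem.List.pyRange 0 ((b : Int)) 1).map (fun m => (a : Int) * (b : Int) + m) := by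
        rw [PySem.List.pyRange_one, PySem.List.pyRange_one]
        rw [show (((a + 1 : Nat) : Int) * (b : Int) - (a : Int) * (b : Int)) = (b : Int) by push_cast; ring]
        rw [show ((b : Int) - 0) = (b : Int) by ring]
        rw [Int.toNat_natCast, List.map_map]
        apply List.map_congr_left
        intro k _
        simp
      rw [htail, List.map_map, List.flatMap_cons, List.flatMap_nil, List.append_nil]
      apply List.map_congr_left
      intro m hm
      rw [PySem.List.mem_pyRange_one] at hm
      have hbne : (b : Int) ≠ 0 := by omega
      have hdiv : PySem.Int.floordiv ((a : Int) * (b : Int) + m) (b : Int) = (a : Int) := by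
        rw [PySem.Int.floordiv_eq_ediv_of_pos hbz]
        rw [show ((a : Int) * (b : Int) + m) = m + (a : Int) * (b : Int) by ring]
        rw [Int.add_mul_ediv_right _ _ hbne, Int.ediv_eq_zero_of_lt hm.1 hm.2]
        ring
      have hmod : PySem.Int.mod ((a : Int) * (b : Int) + m) (b : Int) = m := by
        rw [PySem.Int.mod_eq_emod_of_pos hbz]
        rw [show ((a : Int) * (b : Int) + m) = m + (b : Int) * (a : Int) by ring]
        rw [Int.add_mul_emod_self_left]
        exact Int.emod_eq_of_lt hm.1 hm.2
      simp [hdiv, hmod]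

-- the flat-counter divmod traversal equals three nested ranges
theorem divmod3 (a b c : Nat) :
    (PySem.List.pyRange 0 ((a : Int) * (b : Int) * (c : Int)) 1).map
        (fun i => (PySem.Int.floordiv i ((b : Int) * (c : Int)),
                   PySem.Int.mod (PySem.Int.floordiv i (c : Int)) (b : Int),
                   PySem.Int.mod i (c : Int)))
      = (PySem.List.pyRange 0 (a : Int) 1).flatMap (fun k =>
          (PySem.List.pyRange 0 (b : Int) 1).flatMap (fun l =>
            (PySem.List.pyRange 0 (c : Int) 1).map (fun m => (k, l, m)))) := by
  rcases Nat.eq_zero_or_pos c with hc | hc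
  · subst hc; simp [PySem.List.pyRange_one_eq_nil]
  rcases Nat.eq_zero_or_pos b with hb | hb
  · subst hb; simp [PySem.List.pyRange_one_eq_nil]
  have hcz : (0 : Int) < (c : Int) := by exact_mod_cast hc
  have hbz : (0 : Int) < (b : Int) := by exact_mod_cast hb
  have hcne : (c : Int) ≠ 0 := by omega
  have hbody : (PySem.List.pyRange 0 ((a : Int) * (b : Int) * (c : Int)) 1).map
        (fun i => (PySem.Int.floordiv i ((b : Int) * (c : Int)),
                   PySem.Int.mod (PySem.Int.floordiv i (c : Int)) (b : Int),
                   PySem.Int.mod i (c : Int)))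
      = (PySem.List.pyRange 0 ((a : Int) * ((b : Int) * (c : Int))) 1).map
        (fun i => ((fun (k r : Int) =>
            (k, PySem.Int.mod (PySem.Int.floordiv r (c : Int)) (b : Int),
                PySem.Int.mod r (c : Int)))
          (PySem.Int.floordiv i ((b : Int) * (c : Int)))
          (PySem.Int.mod i ((b : Int) * (c : Int))))) := by
    rw [show ((a : Int) * (b : Int) * (c : Int)) = (a : Int) * ((b : Int) * (c : Int)) by ring]
    apply List.map_congr_left
    intro i hi
    rw [PySem.List.mem_pyRange_one] at hi
    have hbcz : (0 : Int) < (b : Int) * (c : Int) := by positivity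
    have hq := PySem.Int.floordiv_mul_add_mod i ((b : Int) * (c : Int))
    set q := PySem.Int.floordiv i ((b : Int) * (c : Int)) with hqdef
    set r := PySem.Int.mod i ((b : Int) * (c : Int)) with hrdef
    have hr0 : 0 ≤ r := by
      rw [hrdef, PySem.Int.mod_eq_emod_of_pos hbcz]; exact Int.emod_nonneg _ (by omega)
    have hrlt : r < (b : Int) * (c : Int) := by
      rw [hrdef, PySem.Int.mod_eq_emod_of_pos hbcz]; exact Int.emod_lt_of_pos _ hbcz
    have hieq : i = q * ((b : Int) * (c : Int)) + r := by omega
    have hdivc : PySem.Int.floordiv i (c : Int) = q * (b : Int) + PySem.Int.floordiv r (c : Int) := by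
      rw [hieq, PySem.Int.floordiv_eq_ediv_of_pos hcz, PySem.Int.floordiv_eq_ediv_of_pos hcz]
      rw [show (q * ((b : Int) * (c : Int)) + r) = r + (q * (b : Int)) * (c : Int) by ring]
      rw [Int.add_mul_ediv_right _ _ hcne]
      ring
    have hmodc : PySem.Int.mod i (c : Int) = PySem.Int.mod r (c : Int) := by
      rw [hieq, PySem.Int.mod_eq_emod_of_pos hcz, PySem.Int.mod_eq_emod_of_pos hcz]
      rw [show (q * ((b : Int) * (c : Int)) + r) = r + (c : Int) * (q * (b : Int)) by ring]
      rw [Int.add_mul_emod_self_left]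
    have hmodb : PySem.Int.mod (PySem.Int.floordiv i (c : Int)) (b : Int)
        = PySem.Int.mod (PySem.Int.floordiv r (c : Int)) (b : Int) := by
      rw [hdivc, PySem.Int.mod_eq_emod_of_pos hbz, PySem.Int.mod_eq_emod_of_pos hbz]
      rw [show (q * (b : Int) + PySem.Int.floordiv r (c : Int))
            = PySem.Int.floordiv r (c : Int) + (b : Int) * q by ring]
      rw [Int.add_mul_emod_self_left]
    simp only [hmodb, hmodc]
  rw [hbody]
  have h2 := divmod2 a (b * c) (fun k r =>
      (k, PySem.Int.mod (PySem.Int.floordiv r (c : Int)) (b : Int), PySem.Int.mod r (c : Int)))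
  rw [show ((b * c : Nat) : Int) = (b : Int) * (c : Int) by push_cast; ring] at h2
  rw [h2]
  apply List.flatMap_congr
  intro k _
  have h3 := divmod2 b c (fun l m => ((k : Int), l, m))
  rw [← h3]
  apply List.map_congr_left
  intro r hr
  rw [PySem.List.mem_pyRange_one] at hr
  have hdlt : PySem.Int.floordiv r (c : Int) < (b : Int) := by
    rw [PySem.Int.floordiv_eq_ediv_of_pos hcz]
    exact Int.ediv_lt_of_lt_mul hcz hr.2
  have hd0 : 0 ≤ PySem.Int.floordiv r (c : Int) := by
    rw [PySem.Int.floordiv_eq_ediv_of_pos hcz]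
    exact Int.ediv_nonneg hr.1 (by omega)
  have hmb : PySem.Int.mod (PySem.Int.floordiv r (c : Int)) (b : Int)
      = PySem.Int.floordiv r (c : Int) := by
    rw [PySem.Int.mod_eq_emod_of_pos hbz]
    exact Int.emod_eq_of_lt hd0 hdlt
  simp [hmb]

theorem pyRange_zero_one : PySem.List.pyRange 0 1 1 = [0] := by decide

-- ===== VERDICT =====
theorem mk_indices_gen_spec : Claim_equal_mk_indices_gen := by
  intro ar_1 ar_2 ar_3 mode _
  unfold Spec_mk_indices_gen mk_indices_gen mk_indices_gen_alt pvDims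
  split_ifs with h1 h2 h3 h4
  · -- nested
    rw [A_nested ar_1 ar_2 ar_3]
    exact (divmod3 ar_1.length ar_2.length ar_3.length).symm
  · -- co-move
    rw [A_co ar_3]
    dsimp only
    simp only [one_mul]
    have h := divmod3 1 1 ar_3.length
    simp only [Nat.cast_one, one_mul, pyRange_zero_one, List.flatMap_cons, List.flatMap_nil,
      List.append_nil] at h
    exact h.symm
  · -- 2,3_co-move
    rw [A_23 ar_1 ar_3]
    dsimp only
    simp only [one_mul, mul_one]
    have h := divmod3 ar_1.length 1 ar_3.length
    simp only [Nat.cast_one, one_mul, mul_one, pyRange_zero_one, List.flatMap_cons,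
      List.flatMap_nil, List.append_nil] at h
    exact h.symm
  · -- 1,2_co-move
    rw [A_12 ar_2 ar_3]
    dsimp only
    simp only [one_mul]
    have h := divmod3 1 ar_2.length ar_3.length
    simp only [Nat.cast_one, one_mul, pyRange_zero_one, List.flatMap_cons,
      List.flatMap_nil, List.append_nil] at h
    exact h.symm
  · rfl
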